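-- pv_equiv track=rewrite | github.com/ChrisMurphyOnline/cfg-visualization | June_18th.py | find_outside_valid_line
-- ===== SOURCE A (Python) =====
-- def find_next_valid_line(line_num, line_info):
--     """
--     Find the next valid line number that contains relevant information.
--
--     Args:
--     line_num (int): The current line number.
--     line_info (dict): Dictionary containing information about each line.
--
--     Returns:
--     int: The next valid line number.
--     """
--     for i in range(line_num + 1, max(line_info.keys()) + 1):
--         if line_info.get(i) is not None and line_info.get(i) != '}':
--             return i
--     return None
--
-- def find_outside_valid_line(valid_end_line, line_info, conditionals, brace_groups):
--     """
--     Find the next valid line outside of the current conditional block.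
--
--     Args:
--     valid_end_line (int): The current valid end line number.
--     line_info (dict): Dictionary containing information about each line.
--     conditionals (int): The count of conditionals processed.
--     brace_groups (list): List of pairs of opening and closing braces.
--
--     Returns:
--     int: The next valid line number outside of conditionals.
--     """
--     while valid_end_line and line_info.get(valid_end_line) in ['ei', 'e', 'w', 'f']:
--         if conditionals >= len(brace_groups):
--             return None
--         start_line, end_line = brace_groups[conditionals]
--         valid_end_line = find_next_valid_line(end_line, line_info)
--         conditionals += 1
--     return valid_end_line
-- ===== SOURCE B (Python) =====
-- def find_outside_valid_line(valid_end_line, line_info, conditionals, brace_groups):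
--     # Different algorithm: instead of re-scanning line numbers for every
--     # conditional, sort the valid line numbers once and compute the whole
--     # next-valid-line table for all brace groups with a single two-pointer
--     # merge over (groups sorted by end line) x (sorted valid lines); the
--     # answer is then the first table entry that escapes the keyword set.
--     words = ('ei', 'e', 'w', 'f')
--     if not (valid_end_line and line_info.get(valid_end_line) in words):
--         return valid_end_line
--     keys = sorted(k for k, s in line_info.items() if s is not None and s != '}')
--     n = len(brace_groups)
--     order = sorted(range(n), key=lambda i: brace_groups[i][1])
--     nxt = [None] * n
--     j = 0
--     for i in order:
--         e = brace_groups[i][1]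
--         while j < len(keys) and keys[j] <= e:
--             j += 1
--         nxt[i] = keys[j] if j < len(keys) else None
--     c = conditionals
--     while c < n:
--         v = nxt[c]
--         if not (v and line_info.get(v) in words):
--             return v
--         c += 1
--     return None
-- ===== Notes on version B (the rewrite author's own statement) =====
-- stated objective: alternative
-- what changed: B replaces A's stateful while-loop (which re-scans every line number in range(end+1, max(keys)+1) per conditional) by sorting the valid line numbers once, filling the whole next-valid-line table for all brace groups with a single two-pointer merge over groups sorted by end line, and returning the first table entry that escapes the keyword set; Pre_ only excludes inputs where A raises IndexError (loop entered with conditionals < -len(brace_groups)), where B raises identically.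
import Mathlib
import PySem

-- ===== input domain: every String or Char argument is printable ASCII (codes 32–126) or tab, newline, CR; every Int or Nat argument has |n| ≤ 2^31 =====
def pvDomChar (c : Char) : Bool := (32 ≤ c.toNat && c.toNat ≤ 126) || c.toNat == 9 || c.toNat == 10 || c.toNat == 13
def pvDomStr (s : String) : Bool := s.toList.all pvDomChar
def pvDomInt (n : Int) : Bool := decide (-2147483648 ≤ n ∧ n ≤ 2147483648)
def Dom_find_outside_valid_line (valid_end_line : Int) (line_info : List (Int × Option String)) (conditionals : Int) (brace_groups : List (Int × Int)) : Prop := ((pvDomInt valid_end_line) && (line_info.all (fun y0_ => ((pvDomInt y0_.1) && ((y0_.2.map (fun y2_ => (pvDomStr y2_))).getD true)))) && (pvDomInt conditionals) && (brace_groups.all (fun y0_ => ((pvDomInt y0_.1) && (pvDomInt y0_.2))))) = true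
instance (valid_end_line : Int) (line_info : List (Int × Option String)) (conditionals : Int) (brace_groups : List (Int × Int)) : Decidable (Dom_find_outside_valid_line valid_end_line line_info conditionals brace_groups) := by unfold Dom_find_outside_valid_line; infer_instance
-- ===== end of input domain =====

-- B sorts the valid line numbers once and fills the whole next-valid-line table for all brace
-- groups with one two-pointer merge (groups sorted by end line vs sorted valid lines), then
-- returns the first table entry escaping the keyword set; proved equal wherever A returns.


-- ===== PORT A =====

-- line_info.get(i) is not None and line_info.get(i) != '}'
def pvValid (d : PySem.Dict Int (Option String)) (i : Int) : Bool :=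
  match d.getD i none with
  | some s => decide (s ≠ "}")
  | none => false

-- A's helper: scan range(line_num+1, max(keys)+1) for the first valid line.
-- Python raises ValueError when the dict is empty (max of []); that branch is
-- never reached from find_outside_valid_line's loop, the port returns none there.
def find_next_valid_line (line_num : Int) (d : PySem.Dict Int (Option String)) : Option Int :=
  match PySem.List.max? (PySem.Dict.keys d) (fun k => k) with
  | none => none
  | some m => (PySem.List.pyRange (line_num + 1) (m + 1) 1).find? (pvValid d)

-- 'valid_end_line and line_info.get(valid_end_line) in ["ei","e","w","f"]' (0 and None falsy)
def pvLoopCond (d : PySem.Dict Int (Option String)) (v : Option Int) : Bool :=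
  match v with
  | some x => x != 0 && ((d.getD x none) == some "ei" || (d.getD x none) == some "e"
              || (d.getD x none) == some "w" || (d.getD x none) == some "f")
  | none => false

-- A's while loop; brace_groups[conditionals] raises IndexError when out of range
-- (Pre_ excludes that), the port returns none there.
def pvLoopA (d : PySem.Dict Int (Option String)) (bg : List (Int × Int)) (c : Int) (v : Option Int) : Option Int :=
  if pvLoopCond d v then
    if _hge : c ≥ (bg.length : Int) then none
    else
      match PySem.List.pyGet? bg c with
      | none => none
      | some p => pvLoopA d bg (c + 1) (find_next_valid_line p.2 d)
  else v
termination_by ((bg.length : Int) - c).toNat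
decreasing_by omega

def find_outside_valid_line (valid_end_line : Int) (line_info : List (Int × Option String)) (conditionals : Int) (brace_groups : List (Int × Int)) : Option Int :=
  pvLoopA (PySem.Dict.ofList line_info) brace_groups conditionals (some valid_end_line)

-- ===== PORT B =====

-- B's inner while: advance j while j < len(keys) and keys[j] <= e
def pvAdvance (keys : List Int) (e : Int) (j : Nat) : Nat :=
  if j < keys.length ∧ keys.getD j 0 ≤ e then pvAdvance keys e (j + 1) else j
termination_by keys.length - j
decreasing_by omega

-- one step of B's merge over the groups in ascending end-line order:
-- j advances, then nxt[i] = keys[j] if j < len(keys) else None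
def pvMergeStep (bg : List (Int × Int)) (keys : List Int) (st : Nat × List (Option Int)) (i : Int) : Nat × List (Option Int) :=
  let e := (PySem.List.pyGetD bg i (0, 0)).2   -- i comes from range(len(bg)): always in range
  let j := pvAdvance keys e st.1
  (j, PySem.List.pySetD st.2 i keys[j]?)

-- B's final while: scan nxt[c] for c = conditionals, …, n-1; nxt[c] with a
-- negative c wraps like Python (IndexError for c < -n is excluded by Pre_).
def pvLoopB (d : PySem.Dict Int (Option String)) (nxt : List (Option Int)) (n c : Int) : Option Int :=
  if _h : c < n then
    let v := PySem.List.pyGetD nxt c none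
    if pvLoopCond d v then pvLoopB d nxt n (c + 1) else v
  else none
termination_by (n - c).toNat
decreasing_by omega

def find_outside_valid_line_alt (valid_end_line : Int) (line_info : List (Int × Option String)) (conditionals : Int) (brace_groups : List (Int × Int)) : Option Int :=
  let d := PySem.Dict.ofList line_info
  if pvLoopCond d (some valid_end_line) then
    let keys := PySem.List.sorted
      ((d.items.filter (fun p => match p.2 with | some s => decide (s ≠ "}") | none => false)).map Prod.fst)
      (fun k => k) false
    let n : Int := (brace_groups.length : Int)
    let order := PySem.List.sorted (PySem.List.pyRange 0 n 1)
      (fun i => (PySem.List.pyGetD brace_groups i (0, 0)).2) false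
    let nxt := (order.foldl (pvMergeStep brace_groups keys) (0, List.replicate brace_groups.length none)).2
    pvLoopB d nxt n conditionals
  else some valid_end_line

-- ===== PRECONDITION & SPEC =====
-- Pre_ excludes only the inputs where the Python A raises IndexError: the loop is entered
-- (valid_end_line truthy with a conditional-keyword line) while conditionals < -len(brace_groups).
def Pre_find_outside_valid_line (valid_end_line : Int) (line_info : List (Int × Option String)) (conditionals : Int) (brace_groups : List (Int × Int)) : Prop :=
  ¬ (pvLoopCond (PySem.Dict.ofList line_info) (some valid_end_line) = true ∧ conditionals < -(brace_groups.length : Int))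
instance (valid_end_line : Int) (line_info : List (Int × Option String)) (conditionals : Int) (brace_groups : List (Int × Int)) : Decidable (Pre_find_outside_valid_line valid_end_line line_info conditionals brace_groups) := by unfold Pre_find_outside_valid_line; infer_instance

def pvWitness_find_outside_valid_line : Int × (List (Int × Option String)) × Int × (List (Int × Int)) :=
  (3, [(3, some "ei"), (4, some "}"), (5, some "x")], 0, [(3, 4)])

def Spec_find_outside_valid_line (valid_end_line : Int) (line_info : List (Int × Option String)) (conditionals : Int) (brace_groups : List (Int × Int)) (out : Option Int) : Prop := out = find_outside_valid_line_alt valid_end_line line_info conditionals brace_groups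
instance (valid_end_line : Int) (line_info : List (Int × Option String)) (conditionals : Int) (brace_groups : List (Int × Int)) (out : Option Int) : Decidable (Spec_find_outside_valid_line valid_end_line line_info conditionals brace_groups out) := by unfold Spec_find_outside_valid_line; infer_instance

-- ===== CLAIM (what is proved, stated in full; the proofs are below) =====
def Claim_equal_find_outside_valid_line : Prop := ∀ (valid_end_line : Int) (line_info : List (Int × Option String)) (conditionals : Int) (brace_groups : List (Int × Int)), Dom_find_outside_valid_line valid_end_line line_info conditionals brace_groups → Pre_find_outside_valid_line valid_end_line line_info conditionals brace_groups → Spec_find_outside_valid_line valid_end_line line_info conditionals brace_groups (find_outside_valid_line valid_end_line line_info conditionals brace_groups)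

-- ===== LEMMAS AND PROOFS =====

theorem foldl_min_eq_self (x : Int) (s : List Int) (h : ∀ y ∈ s, x ≤ y) : s.foldl min x = x := by
  induction s with
  | nil => rfl
  | cons y t ih =>
    simp only [List.foldl_cons]
    rw [min_eq_left (h y (by simp))]
    exact ih (fun z hz => h z (by simp [hz]))

-- first match in a strictly increasing list = minimum among the matches
theorem find_eq_min (l : List Int) (p : Int → Bool) (hl : l.Pairwise (· < ·)) :
    l.find? p = PySem.List.min? (l.filter p) (fun k => k) := by
  induction l with
  | nil => rfl
  | cons x t ih =>
    rcases List.pairwise_cons.mp hl with ⟨hx, ht⟩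
    by_cases hp : p x = true
    · rw [List.find?_cons_of_pos hp, List.filter_cons_of_pos hp,
        PySem.List.min?_id_cons, foldl_min_eq_self]
      intro y hy
      exact le_of_lt (hx y (List.mem_of_mem_filter hy))
    · rw [List.find?_cons_of_neg hp, List.filter_cons_of_neg (by simp [hp]), ih ht]

-- the value of min() depends only on the set of elements
theorem min?_congr_mem (l₁ l₂ : List Int) (h : ∀ x, x ∈ l₁ ↔ x ∈ l₂) :
    PySem.List.min? l₁ (fun k => k) = PySem.List.min? l₂ (fun k => k) := by
  cases h1 : PySem.List.min? l₁ (fun k => k) with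
  | none =>
    cases h2 : PySem.List.min? l₂ (fun k => k) with
    | none => rfl
    | some b =>
      have hb := PySem.List.min?_mem h2
      rw [PySem.List.min?_eq_none_iff] at h1
      exact absurd ((h b).mpr hb) (by simp [h1])
  | some a =>
    cases h2 : PySem.List.min? l₂ (fun k => k) with
    | none =>
      have ha := PySem.List.min?_mem h1
      rw [PySem.List.min?_eq_none_iff] at h2
      exact absurd ((h a).mp ha) (by simp [h2])
    | some b =>
      have hab := PySem.List.min?_isMin h1 b ((h b).mpr (PySem.List.min?_mem h2))
      have hba := PySem.List.min?_isMin h2 a ((h a).mp (PySem.List.min?_mem h1))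
      simp only [Option.some.injEq]
      omega

-- min((k for k in valid_keys if k > e), default=None), used as the table's specification
def pvNextB (validKeys : List Int) (endLine : Int) : Option Int :=
  PySem.List.min? (validKeys.filter (fun k => decide (endLine < k))) (fun k => k)

-- B's unsorted valid keys, as find_outside_valid_line_alt filters them
def pvVK (li : List (Int × Option String)) : List Int :=
  (((PySem.Dict.ofList li).items.filter
      (fun p => match p.2 with | some s => decide (s ≠ "}") | none => false)).map Prod.fst)

theorem mem_pvVK (li : List (Int × Option String)) (k : Int) :
    k ∈ pvVK li ↔ pvValid (PySem.Dict.ofList li) k = true := by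
  have hnd : (PySem.Dict.ofList li).keys.Nodup := PySem.Dict.nodup_keys_ofList li
  constructor
  · intro hk
    rcases List.mem_map.mp hk with ⟨p, hp, hpk⟩
    rcases List.mem_filter.mp hp with ⟨hmem, hq⟩
    cases hv : p.2 with
    | none => rw [hv] at hq; simp at hq
    | some s =>
      rw [hv] at hq
      have hgd := PySem.Dict.getD_of_mem_items (PySem.Dict.ofList li)
        (k := k) (v := some s) (by rw [← hpk, ← hv]; simpa using hmem) hnd (none : Option String)
      simp only [pvValid, hgd]
      simpa using hq
  · intro hk
    cases hg : (PySem.Dict.ofList li).getD k none with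
    | none => simp [pvValid, hg] at hk
    | some s =>
      simp only [pvValid, hg, decide_eq_true_eq] at hk
      rw [PySem.Dict.getD_eq_get?_getD] at hg
      have hget : (PySem.Dict.ofList li).get? k = some (some s) := by
        cases hq : (PySem.Dict.ofList li).get? k with
        | none => rw [hq] at hg; simp at hg
        | some w => rw [hq] at hg; simp at hg; rw [hg]
      have hitem := PySem.Dict.mem_items_of_get?_eq_some (PySem.Dict.ofList li) hget
      exact List.mem_map.mpr ⟨(k, some s), List.mem_filter.mpr ⟨hitem, by simp [hk]⟩, rfl⟩

theorem pvValid_mem_keys (d : PySem.Dict Int (Option String)) (k : Int)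
    (h : pvValid d k = true) : k ∈ d.keys := by
  by_contra hk
  have hn : d.get? k = none := (PySem.Dict.get?_eq_none_iff_not_mem_keys d k).mpr hk
  have := PySem.Dict.getD_of_get?_eq_none d (none : Option String) hn
  simp [pvValid, this] at h

-- A's range scan computes exactly min() over the unsorted valid keys
theorem next_eq (li : List (Int × Option String)) (e : Int) :
    find_next_valid_line e (PySem.Dict.ofList li) = pvNextB (pvVK li) e := by
  unfold find_next_valid_line pvNextB
  cases hm : PySem.List.max? (PySem.Dict.keys (PySem.Dict.ofList li)) (fun k => k) with
  | none =>
    rw [PySem.List.max?_eq_none_iff] at hm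
    have hvk : pvVK li = [] := by
      rw [List.eq_nil_iff_forall_not_mem]
      intro x hx
      have := pvValid_mem_keys _ x ((mem_pvVK li x).mp hx)
      rw [hm] at this
      exact absurd this List.not_mem_nil
    rw [hvk]
    rfl
  | some m =>
    dsimp only
    rw [find_eq_min _ _ (PySem.List.pairwise_lt_pyRange_one _ _)]
    apply min?_congr_mem
    intro x
    simp only [List.mem_filter, PySem.List.mem_pyRange_one, mem_pvVK, decide_eq_true_eq]
    constructor
    · rintro ⟨⟨h1, _⟩, h3⟩
      exact ⟨h3, by omega⟩
    · rintro ⟨h1, h2⟩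
      have hle : x ≤ m := PySem.List.max?_isMax hm x (pvValid_mem_keys _ x h1)
      exact ⟨⟨by omega, by omega⟩, h1⟩

-- B's sorted key list
def pvKeys (li : List (Int × Option String)) : List Int :=
  PySem.List.sorted (pvVK li) (fun k => k) false

theorem pvVK_nodup (li : List (Int × Option String)) : (pvVK li).Nodup := by
  have h1 : ((PySem.Dict.ofList li).items.map Prod.fst).Nodup := PySem.Dict.nodup_keys_ofList li
  have h2 : (pvVK li).Sublist ((PySem.Dict.ofList li).items.map Prod.fst) :=
    List.Sublist.map Prod.fst List.filter_sublist
  exact h2.nodup h1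

theorem pvKeys_pairwise_lt (li : List (Int × Option String)) : (pvKeys li).Pairwise (· < ·) := by
  have hle : (pvKeys li).Pairwise (· ≤ ·) := PySem.List.sorted_pairwise (pvVK li) (fun k => k)
  have hnd : (pvKeys li).Nodup :=
    ((PySem.List.sorted_perm (pvVK li) (fun k => k) false).nodup_iff).mpr (pvVK_nodup li)
  exact (hle.and hnd).imp (fun h => lt_of_le_of_ne h.1 h.2)

-- B's sorted-key first-hit equals A's range scan
theorem specNext_eq (li : List (Int × Option String)) (e : Int) :
    (pvKeys li).find? (fun k => decide (e < k)) = find_next_valid_line e (PySem.Dict.ofList li) := by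
  rw [next_eq, find_eq_min _ _ (pvKeys_pairwise_lt li)]
  unfold pvNextB
  apply min?_congr_mem
  intro x
  simp only [List.mem_filter, pvKeys, PySem.List.mem_sorted]

theorem pySetD_eq_set {α : Type} (xs : List α) (i : Int) (v : α) (h0 : 0 ≤ i) (h1 : i < xs.length) :
    PySem.List.pySetD xs i v = xs.set i.toNat v := by
  have h : PySem.List.pyIdx? xs.length i = some i.toNat := by
    unfold PySem.List.pyIdx?
    rw [if_pos h0, if_pos h1]
  simp [PySem.List.pySetD, PySem.List.pySet?, h]

-- B's inner while loop: where the pointer stops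
theorem pvAdvance_spec (keys : List Int) (e : Int) :
    ∀ (j : Nat), j ≤ keys.length → (∀ idx < j, keys.getD idx 0 ≤ e) →
      j ≤ pvAdvance keys e j ∧ pvAdvance keys e j ≤ keys.length ∧
      (∀ idx < pvAdvance keys e j, keys.getD idx 0 ≤ e) ∧
      (pvAdvance keys e j < keys.length → e < keys.getD (pvAdvance keys e j) 0) := by
  intro j
  induction j using pvAdvance.induct keys e with
  | case1 j hcond ih =>
    intro hle hpre
    rw [pvAdvance, if_pos hcond]
    have := ih (by omega) (by
      intro idx hidx
      rcases Nat.lt_or_ge idx j with h | h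
      · exact hpre idx h
      · have : idx = j := by omega
        subst this; exact hcond.2)
    exact ⟨by omega, this.2.1, this.2.2.1, this.2.2.2⟩
  | case2 j hcond =>
    intro hle hpre
    rw [pvAdvance, if_neg hcond]
    refine ⟨le_refl _, hle, hpre, ?_⟩
    intro hlt
    rcases not_and_or.mp hcond with h | h
    · exact absurd hlt h
    · omega

-- find? located by a failing prefix and a succeeding stop position
theorem find?_eq_getElem? (p : Int → Bool) :
    ∀ (l : List Int) (m : Nat), m ≤ l.length →
      (∀ idx < m, p (l.getD idx 0) = false) → (m < l.length → p (l.getD m 0) = true) →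
      l.find? p = l[m]? := by
  intro l
  induction l with
  | nil =>
    intro m hm _ _
    have h0 : m = 0 := by simpa using hm
    subst h0
    rfl
  | cons x t ih =>
    intro m hm hpre hstop
    cases m with
    | zero =>
      have hx : p x = true := by simpa using hstop (by simp)
      simp [List.find?_cons_of_pos hx]
    | succ m' =>
      have hx : p x = false := by simpa using hpre 0 (by omega)
      rw [List.find?_cons_of_neg (by simp [hx])]
      simpa using ih m' (by simpa using hm) (fun idx hidx => by simpa using hpre (idx + 1) (by omega))
        (fun h => by simpa using hstop (by simpa using h))

-- the end line of group i, as B reads it (i always in range when used)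
def pvEOf (bg : List (Int × Int)) (i : Int) : Int := (PySem.List.pyGetD bg i (0, 0)).2

-- the two-pointer merge fills every visited slot with the sorted-key first hit
theorem merge_fold (bg : List (Int × Int)) (keys : List Int) :
    ∀ (os : List Int) (j : Nat) (tbl : List (Option Int)),
      tbl.length = bg.length → j ≤ keys.length →
      (∀ i ∈ os, 0 ≤ i ∧ i < (bg.length : Int)) →
      os.Pairwise (fun a b => pvEOf bg a ≤ pvEOf bg b) →
      os.Nodup →
      (∀ i ∈ os, ∀ idx < j, keys.getD idx 0 ≤ pvEOf bg i) →
      (os.foldl (pvMergeStep bg keys) (j, tbl)).2.length = bg.length ∧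
      ∀ (k : Nat), k < bg.length →
        (os.foldl (pvMergeStep bg keys) (j, tbl)).2[k]? =
          if (k : Int) ∈ os then some (keys.find? (fun x => decide (pvEOf bg (k : Int) < x)))
          else tbl[k]? := by
  intro os
  induction os with
  | nil =>
    intro j tbl hlen _ _ _ _ _
    refine ⟨hlen, fun k hk => ?_⟩
    simp
  | cons i os' ih =>
    intro j tbl hlen hj hrange hpair hnd hinv
    have hi := hrange i (by simp)
    have hadv := pvAdvance_spec keys (pvEOf bg i) j hj (hinv i (by simp))
    set j' := pvAdvance keys (pvEOf bg i) j with hj'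
    have hstep : pvMergeStep bg keys (j, tbl) i = (j', tbl.set i.toNat keys[j']?) := by
      show (j', PySem.List.pySetD tbl i keys[j']?) = (j', tbl.set i.toNat keys[j']?)
      rw [pySetD_eq_set tbl i _ hi.1 (by omega)]
    have hfind : keys[j']? = keys.find? (fun x => decide (pvEOf bg i < x)) := by
      rw [find?_eq_getElem? _ keys j' hadv.2.1
        (fun idx hidx => by simpa using not_lt.mpr (hadv.2.2.1 idx hidx))
        (fun h => by simpa using hadv.2.2.2 h)]
    have hpair' := List.pairwise_cons.mp hpair
    have hnd' := List.nodup_cons.mp hnd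
    have ihres := ih j' (tbl.set i.toNat keys[j']?)
      (by simpa using hlen) hadv.2.1
      (fun x hx => hrange x (by simp [hx]))
      hpair'.2 hnd'.2
      (fun x hx idx hidx => le_trans (hadv.2.2.1 idx hidx) (hpair'.1 x hx))
    rw [List.foldl_cons, hstep]
    refine ⟨ihres.1, fun k hk => ?_⟩
    rw [ihres.2 k hk]
    by_cases hki : (k : Int) = i
    · have hknot : (k : Int) ∉ os' := by rw [hki]; exact hnd'.1
      rw [if_neg hknot, if_pos (by simp [hki])]
      have hkeq : i.toNat = k := by omega
      rw [hkeq, List.getElem?_set_self (by omega), hki, hfind]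
    · by_cases hkos : (k : Int) ∈ os'
      · rw [if_pos hkos, if_pos (by simp [hkos])]
      · rw [if_neg hkos, if_neg (by simp [hki, hkos]),
          List.getElem?_set_ne (by omega)]

-- B's order list: a permutation of range(len(bg)) sorted by end line
theorem order_props (bg : List (Int × Int)) :
    let order := PySem.List.sorted (PySem.List.pyRange 0 (bg.length : Int) 1)
      (fun i => (PySem.List.pyGetD bg i (0, 0)).2) false
    (∀ i ∈ order, 0 ≤ i ∧ i < (bg.length : Int)) ∧
    order.Pairwise (fun a b => pvEOf bg a ≤ pvEOf bg b) ∧ order.Nodup ∧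
    (∀ k : Nat, k < bg.length → (k : Int) ∈ order) := by
  refine ⟨?_, ?_, ?_, ?_⟩
  · intro i hi
    rw [PySem.List.mem_sorted] at hi
    exact PySem.List.mem_pyRange_one.mp hi
  · exact PySem.List.sorted_pairwise _ _
  · exact ((PySem.List.sorted_perm _ _ _).nodup_iff).mpr (PySem.List.nodup_pyRange_one _ _)
  · intro k hk
    rw [PySem.List.mem_sorted]
    exact PySem.List.mem_pyRange_one.mpr ⟨by omega, by omega⟩

-- the whole table, slot by slot, equals A's helper on the matching end line
theorem nxt_table (li : List (Int × Option String)) (bg : List (Int × Int)) :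
    let order := PySem.List.sorted (PySem.List.pyRange 0 (bg.length : Int) 1)
      (fun i => (PySem.List.pyGetD bg i (0, 0)).2) false
    let nxt := (order.foldl (pvMergeStep bg (pvKeys li)) (0, List.replicate bg.length none)).2
    nxt.length = bg.length ∧
    ∀ (k : Nat), k < bg.length →
      nxt.getD k none = find_next_valid_line ((bg.getD k (0, 0)).2) (PySem.Dict.ofList li) := by
  obtain ⟨h1, h2, h3, h4⟩ := order_props bg
  have hm := merge_fold bg (pvKeys li) _ 0 (List.replicate bg.length none)
    (by simp) (by omega) h1 h2 h3 (by omega)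
  refine ⟨hm.1, fun k hk => ?_⟩
  rw [List.getD_eq_getElem?_getD, hm.2 k hk, if_pos (h4 k hk), specNext_eq]
  have : pvEOf bg (k : Int) = (bg.getD k (0, 0)).2 := by
    unfold pvEOf
    rw [PySem.List.pyGetD_eq_getElem bg _ (by omega) (by omega),
      List.getD_eq_getElem bg (0, 0) hk]
    simp
  rw [this]
  rfl

-- the two loops agree step for step
theorem loop_eq (d : PySem.Dict Int (Option String)) (bg : List (Int × Int))
    (nxt : List (Option Int)) (hlen : nxt.length = bg.length)
    (htab : ∀ (k : Nat), k < bg.length →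
      nxt.getD k none = find_next_valid_line ((bg.getD k (0, 0)).2) d) :
    ∀ (fuel : Nat) (c : Int) (v : Option Int), (((bg.length : Int) - c).toNat = fuel) →
      -(bg.length : Int) ≤ c → pvLoopCond d v = true →
      pvLoopA d bg c v = pvLoopB d nxt (bg.length : Int) c := by
  intro fuel
  induction fuel with
  | zero =>
    intro c v hc hcl hcond
    have hge : (bg.length : Int) ≤ c := by omega
    rw [pvLoopA, if_pos hcond, dif_pos hge, pvLoopB, dif_neg (by omega)]
  | succ n ihn =>
    intro c v hc hcl hcond
    have hlt : c < (bg.length : Int) := by omega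
    -- the table entry at c is A's next value
    obtain ⟨k, hkb, hbgk, hnxtk⟩ :
        ∃ (k : Nat), k < bg.length ∧ PySem.List.pyGet? bg c = some (bg.getD k (0, 0)) ∧
          PySem.List.pyGetD nxt c none = nxt.getD k none := by
      rcases (by omega : 0 ≤ c ∨ c < 0) with h0 | h0
      · refine ⟨c.toNat, by omega, ?_, ?_⟩
        · rw [PySem.List.pyGet?_eq_some_getElem bg h0 hlt,
            List.getD_eq_getElem bg (0, 0) (by omega)]
        · rw [PySem.List.pyGetD_eq_getElem nxt none h0 (by omega),
            List.getD_eq_getElem nxt none (by omega)]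
      · refine ⟨bg.length - (-c).toNat, by omega, ?_, ?_⟩
        · rw [show c = -(((-c).toNat : Nat) : Int) by omega,
            PySem.List.pyGet?_neg_natCast bg (-c).toNat (by omega) (by omega),
            List.getElem?_eq_getElem (by omega), List.getD_eq_getElem bg (0, 0) (by omega)]
          simp only [neg_neg, Int.toNat_natCast]
        · rw [show c = -(((-c).toNat : Nat) : Int) by omega,
            PySem.List.pyGetD_neg_natCast nxt (-c).toNat none (by omega) (by omega),
            List.getD_eq_getElem nxt none (by omega)]
          congr 1
          omega
    have hval : PySem.List.pyGetD nxt c none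
        = find_next_valid_line ((bg.getD k (0, 0)).2) d := by
      rw [hnxtk, htab k hkb]
    rw [pvLoopA, if_pos hcond, dif_neg (by omega), hbgk]
    rw [pvLoopB, dif_pos hlt]
    simp only [hval]
    by_cases hcond2 : pvLoopCond d (find_next_valid_line ((bg.getD k (0, 0)).2) d) = true
    · rw [if_pos hcond2]
      exact ihn (c + 1) _ (by omega) (by omega) hcond2
    · rw [if_neg hcond2, pvLoopA, if_neg hcond2]

-- ===== VERDICT (by name: the statement is the Claim_ definition above) =====
theorem find_outside_valid_line_spec : Claim_equal_find_outside_valid_line := by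
  intro vel li c bg _ hpre
  unfold Spec_find_outside_valid_line find_outside_valid_line find_outside_valid_line_alt
  by_cases hcond : pvLoopCond (PySem.Dict.ofList li) (some vel) = true
  · rw [if_pos hcond]
    have hcl : -(bg.length : Int) ≤ c := by
      by_contra h
      exact hpre ⟨hcond, by omega⟩
    obtain ⟨hlen, htab⟩ := nxt_table li bg
    exact loop_eq (PySem.Dict.ofList li) bg _ hlen htab _ c (some vel) rfl hcl hcond
  · rw [if_neg hcond, pvLoopA, if_neg hcond]
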